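-- pv_equiv track=rewrite | github.com/poushwell/orchesis | src/orchesis/tool_policy.py | _blocked_domain
-- ===== SOURCE A (Python) =====
-- import fnmatch
--
-- def _blocked_domain(host: str, patterns: list[str]) -> bool:
--     safe_host = str(host or "").lower().strip()
--     if not safe_host:
--         return False
--     for pattern in patterns:
--         p = str(pattern or "").lower().strip()
--         if not p:
--             continue
--         if fnmatch.fnmatch(safe_host, p):
--             return True
--     return False
-- ===== SOURCE B (Python) =====
-- # B: self-contained glob matcher. Each pattern is parsed once into a flat token
-- # list (star / any-char / literal / character class as a list of ranges), and
-- # the match is decided by an iterative dynamic program over string suffixes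
-- # (an NFA simulation): row[j] says whether tokens[j:] match the current suffix.
-- # No regex machinery and no recursion during matching.
--
-- STAR = ('*',)
-- ANY = ('?',)
--
--
-- def _find_class_end(pat, i):
--     """Index of the ']' closing the class opened at pat[i-1], or -1.
--
--     A ']' in the first position (after an optional leading '!') is a literal."""
--     if i < len(pat) and pat[i] == '!':
--         i += 1
--     if i < len(pat) and pat[i] == ']':
--         i += 1
--     while i < len(pat) and pat[i] != ']':
--         i += 1
--     return i if i < len(pat) else -1
--
--
-- def _parse_class(body):
--     """(negated, ranges) of a class body.
--
--     Read left to right: 'x-y' is the range x..y (three characters; empty when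
--     x > y), any other character stands for itself; a trailing '-' is a literal.
--     A leading '!' negates the class."""
--     neg = body.startswith('!')
--     if neg:
--         body = body[1:]
--     ranges = []
--     i = 0
--     while i < len(body):
--         if i + 2 < len(body) and body[i + 1] == '-':
--             ranges.append((body[i], body[i + 2]))
--             i += 3
--         else:
--             ranges.append((body[i], body[i]))
--             i += 1
--     return neg, ranges
--
--
-- def _compile(pat):
--     """Glob pattern -> flat token list."""
--     toks = []
--     i = 0
--     while i < len(pat):
--         c = pat[i]
--         if c == '*':
--             toks.append(STAR)
--             i += 1
--         elif c == '?':
--             toks.append(ANY)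
--             i += 1
--         elif c == '[':
--             end = _find_class_end(pat, i + 1)
--             if end < 0:
--                 toks.append(('lit', '['))
--                 i += 1
--             else:
--                 neg, ranges = _parse_class(pat[i + 1:end])
--                 toks.append(('cls', neg, ranges))
--                 i = end + 1
--         else:
--             toks.append(('lit', c))
--             i += 1
--     return toks
--
--
-- def _tok_hits(t, c):
--     if t is ANY:
--         return True
--     if t[0] == 'lit':
--         return c == t[1]
--     neg, ranges = t[1], t[2]
--     return any(lo <= c <= hi for lo, hi in ranges) != neg
--
--
-- def _match(toks, s):
--     """row[j] == 'toks[j:] matches the current suffix of s'; built right-to-left."""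
--     m = len(toks)
--     row = [False] * (m + 1)
--     row[m] = True
--     for j in range(m - 1, -1, -1):
--         row[j] = row[j + 1] and toks[j] is STAR
--     rng = range(m - 1, -1, -1)
--     for c in reversed(s):
--         if not any(row):
--             return False
--         new = [False] * (m + 1)
--         for j in rng:
--             t = toks[j]
--             if t is STAR:
--                 new[j] = new[j + 1] or row[j]
--             else:
--                 new[j] = row[j + 1] and _tok_hits(t, c)
--         row = new
--     return row[0]
--
--
-- def _blocked_domain(host: str, patterns: list[str]) -> bool:
--     safe_host = str(host or "").lower().strip()
--     if not safe_host:
--         return False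
--     return any(_match(_compile(str(p or "").lower().strip()), safe_host)
--                for p in patterns)
-- ===== Notes on version B (the rewrite author's own statement) =====
-- stated objective: faster
-- what changed: A loops over patterns calling fnmatch.fnmatch (regex translation + regex match per pattern); B parses each pattern once into a flat token list (star/any/literal/character-class-of-ranges) and decides the match with an iterative suffix dynamic program (NFA simulation) that stops as soon as no token suffix can still match; …
-- outside the precondition, e.g. on _blocked_domain('b', ['[9-0!a]']): A returns True, B returns False; on _blocked_domain('z', ['[b-a]']): A returns False, B returns False
import Mathlib
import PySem

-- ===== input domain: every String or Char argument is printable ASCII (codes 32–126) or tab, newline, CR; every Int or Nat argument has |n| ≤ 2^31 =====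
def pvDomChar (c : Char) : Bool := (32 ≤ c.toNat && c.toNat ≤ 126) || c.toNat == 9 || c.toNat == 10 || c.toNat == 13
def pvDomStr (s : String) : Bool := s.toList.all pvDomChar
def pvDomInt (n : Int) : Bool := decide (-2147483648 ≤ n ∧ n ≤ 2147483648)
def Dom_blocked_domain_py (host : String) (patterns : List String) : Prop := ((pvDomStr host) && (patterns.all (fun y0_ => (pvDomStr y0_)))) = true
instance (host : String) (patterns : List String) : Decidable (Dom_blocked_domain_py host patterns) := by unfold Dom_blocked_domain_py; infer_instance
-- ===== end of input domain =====

-- B replaces A's per-pattern fnmatch/regex calls by a one-shot compilation of each glob into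
-- flat tokens and an iterative suffix dynamic program with an early exit; equality is claimed
-- on Pre_, which excludes patterns containing a character class with a reversed range ([z-a]).

/-- `str(x or "").lower().strip()` of A and B (on str, `x or ""` is `x` unless empty). -/
def pvNorm (s : String) : List Char := PySem.Chars.strip (PySem.Chars.lower s.toList)

-- ===== PORT A =====
-- A calls fnmatch.fnmatch; its matching semantics (CPython fnmatch.translate + regex match)
-- is ported by hand below, step for step: the class scan, translate's chunking of a class
-- body around '-', its removal of empty ranges, and the resulting literal/range reading.

/-- Scan for the first unskipped `']'`: returns (chars before, chars after). -/
def scanBody : List Char → Option (List Char × List Char)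
  | [] => none
  | c :: r => if c = ']' then some ([], r) else (scanBody r).map (fun br => (c :: br.1, br.2))

lemma scanBody_len : ∀ {l b rest : List Char}, scanBody l = some (b, rest) → rest.length < l.length := by
  intro l
  induction l with
  | nil => intro b rest h; simp [scanBody] at h
  | cons c r ih =>
    intro b rest h
    simp only [scanBody] at h
    split at h
    · simp at h; obtain ⟨h1, h2⟩ := h; subst h2; simp
    · cases hs : scanBody r with
      | none => rw [hs] at h; simp at h
      | some br =>
        rw [hs] at h; simp at h
        have := ih hs
        simp [← h.2]; omega

/-- The body of a `[...]` class (p = chars after '['), with fnmatch's skip rules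
    ('!' first negates, ']' first is literal); none = unterminated. -/
def splitClass (p : List Char) : Option (List Char × List Char) :=
  match p with
  | [] => none
  | c :: r =>
    if c = '!' then
      match r with
      | [] => none
      | d :: r2 =>
        if d = ']' then (scanBody r2).map (fun br => (c :: d :: br.1, br.2))
        else (scanBody r).map (fun br => (c :: br.1, br.2))
    else if c = ']' then (scanBody r).map (fun br => (c :: br.1, br.2))
    else (scanBody (c :: r)).map (fun br => (br.1, br.2))

lemma splitClass_len : ∀ {p b rest : List Char}, splitClass p = some (b, rest) → rest.length < p.length := by
  intro p b rest h
  rcases p with _ | ⟨c, r⟩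
  · simp [splitClass] at h
  · simp only [splitClass] at h
    split_ifs at h with h1 h2
    · rcases r with _ | ⟨d, r2⟩
      · simp at h
      · simp only at h
        split_ifs at h with h3
        · cases hs : scanBody r2 with
          | none => rw [hs] at h; simp at h
          | some br =>
            obtain ⟨b1, r1⟩ := br
            rw [hs] at h; simp at h
            obtain ⟨-, h2⟩ := h
            subst h2
            have := scanBody_len hs
            simp only [List.length_cons]
            omega
        · cases hs : scanBody (d :: r2) with
          | none => rw [hs] at h; simp at h
          | some br =>
            obtain ⟨b1, r1⟩ := br
            rw [hs] at h; simp at h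
            obtain ⟨-, h2⟩ := h
            subst h2
            have := scanBody_len hs
            simp only [List.length_cons] at *
            omega
    · cases hs : scanBody r with
      | none => rw [hs] at h; simp at h
      | some br =>
        obtain ⟨b1, r1⟩ := br
        rw [hs] at h; simp at h
        obtain ⟨-, h2⟩ := h
        subst h2
        have := scanBody_len hs
        simp only [List.length_cons] at *
        omega
    · cases hs : scanBody (c :: r) with
      | none => rw [hs] at h; simp at h
      | some br =>
        obtain ⟨b1, r1⟩ := br
        rw [hs] at h; simp at h
        obtain ⟨-, h2⟩ := h
        subst h2
        exact scanBody_len hs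

/-- CPython translate's chunking of a class body around unskipped `-`
    (skip = positions not eligible as a split; the `find(..., k+3)` rule). -/
def splitDash : Nat → List Char → List Char → List (List Char)
  | _, acc, [] => [acc.reverse]
  | skip, acc, c :: r =>
    if skip = 0 ∧ c = '-' then acc.reverse :: splitDash 2 [] r
    else splitDash (skip - 1) (c :: acc) r

/-- CPython translate: `if chunk: chunks.append(chunk) else: chunks[-1] += '-'`
    (only the last chunk of `splitDash`'s output can be empty). -/
def fixLast : List (List Char) → List (List Char)
  | [] => []
  | [c] => [c]
  | [c, d] => if d = [] then [c ++ ['-']] else [c, d]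
  | c :: d :: e :: t => c :: fixLast (d :: e :: t)

/-- CPython translate's right-to-left removal of empty ranges
    (`chunks[k-1][-1] > chunks[k][0]`). -/
def mergeChunks : List (List Char) → List (List Char)
  | [] => []
  | [c] => [c]
  | c :: d :: t =>
    match mergeChunks (d :: t) with
    | [] => [c]
    | e :: t' =>
      if e.headD ' ' < c.getLastD ' ' then (c.dropLast ++ e.tail) :: t' else c :: e :: t'

/-- Literals and ranges read off the joined chunks, as the regex class reads them. -/
def extractTok : Bool → List (List Char) → List Char × List (Char × Char)
  | _, [] => ([], [])
  | df, [c] => (if df then c.tail else c, [])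
  | df, c :: d :: t =>
    let c' := if df then c.tail else c
    if c' = [] then
      let res := extractTok false (d :: t)
      ('-' :: res.1, res.2)
    else
      let res := extractTok true (d :: t)
      (c'.dropLast ++ res.1, (c'.getLastD ' ', d.headD ' ') :: res.2)

/-- (negated?, literal chars, ranges) of a class body, per fnmatch.translate. -/
def classTokens (body : List Char) : Bool × List Char × List (Char × Char) :=
  let chunks := mergeChunks (fixLast (splitDash (if body.headD ' ' = '!' then 2 else 1) [] body))
  let neg := (chunks.headD []).headD ' ' = '!'
  let chunks := if neg then (match chunks with | (_ :: t0) :: t => t0 :: t | x => x) else chunks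
  let lr := extractTok false chunks
  (neg, lr.1, lr.2)

def inClass (body : List Char) (c : Char) : Bool :=
  let t := classTokens body
  (t.2.1.contains c || t.2.2.any (fun r => r.1 ≤ c ∧ c ≤ r.2)) != t.1

/-- fnmatch's match, as direct backtracking over the raw pattern
    (the regex `fnmatch.translate` builds matches exactly like this). -/
def rawMatch : List Char → List Char → Bool
  | [], s => s.isEmpty
  | c :: p', s =>
    if c = '*' then
      rawMatch p' s || (match s with | [] => false | _ :: s' => rawMatch (c :: p') s')
    else if c = '?' then
      match s with | [] => false | _ :: s' => rawMatch p' s'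
    else if c = '[' then
      match h : splitClass p' with
      | none => match s with | [] => false | d :: s' => d = '[' && rawMatch p' s'
      | some br => match s with | [] => false | d :: s' => inClass br.1 d && rawMatch br.2 s'
    else
      match s with | [] => false | d :: s' => c = d && rawMatch p' s'
  termination_by p s => p.length + s.length
  decreasing_by
  all_goals first
    | (have := splitClass_len h; simp only [List.length_cons] at *; omega)
    | (simp only [List.length_cons]; omega)

/-- A's for-loop over patterns with early exit. -/
def aLoop (safe : List Char) : List String → Bool
  | [] => false
  | p :: ps =>
    let q := pvNorm p
    if q = [] then aLoop safe ps
    else if rawMatch q safe then true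
    else aLoop safe ps

def blocked_domain_py (host : String) (patterns : List String) : Bool :=
  let safe := pvNorm host
  if safe = [] then false
  else aLoop safe patterns

-- ===== PORT B =====

/-- Source B `_find_class_end`: skip an optional leading '!', then an optional
    literal ']', then scan to the closing ']'; returns (body, rest). -/
def classSplitB (p : List Char) : Option (List Char × List Char) :=
  let s1 : List Char × List Char := if p.headD ' ' = '!' then (['!'], p.tail) else ([], p)
  let s2 : List Char × List Char := if s1.2.headD ' ' = ']' then ([']'], s1.2.tail) else ([], s1.2)
  (scanBody s2.2).map (fun br => (s1.1 ++ s2.1 ++ br.1, br.2))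

lemma classSplitB_eq_splitClass (p : List Char) : classSplitB p = splitClass p := by
  rcases p with _ | ⟨c, r⟩
  · simp [classSplitB, splitClass, scanBody]
  · by_cases hc : c = '!'
    · subst hc
      rcases r with _ | ⟨d, r2⟩
      · simp [classSplitB, splitClass, scanBody]
      · by_cases hd : d = ']'
        · subst hd
          simp [classSplitB, splitClass]
        · simp [classSplitB, splitClass, hd, scanBody]
    · by_cases hd : c = ']'
      · subst hd
        simp [classSplitB, splitClass]
      · simp only [classSplitB, splitClass, List.headD_cons, hc, hd, if_false]
        rw [show scanBody (c :: r) = (scanBody r).map (fun br => (c :: br.1, br.2)) by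
              simp [scanBody, hd]]
        cases scanBody r <;> simp

lemma classSplitB_len {p b rest : List Char} (h : classSplitB p = some (b, rest)) :
    rest.length < p.length := by
  rw [classSplitB_eq_splitClass] at h
  exact splitClass_len h

/-- Source B `_parse_class`'s scan: 'x-y' is a range (three chars), else one literal. -/
def itemsR : List Char → List (Char × Char)
  | x :: '-' :: z :: r => (x, z) :: itemsR r
  | x :: r => (x, x) :: itemsR r
  | [] => []

inductive Tok where
  | star : Tok
  | any : Tok
  | lit : Char → Tok
  | cls : Bool → List (Char × Char) → Tok
deriving DecidableEq, Repr

/-- Source B `_compile`: pattern → flat token list. -/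
def compilePat : List Char → List Tok
  | [] => []
  | c :: p' =>
    if c = '*' then .star :: compilePat p'
    else if c = '?' then .any :: compilePat p'
    else if c = '[' then
      match h : classSplitB p' with
      | none => .lit '[' :: compilePat p'
      | some br =>
        (let neg := br.1.headD ' ' = '!'
         Tok.cls neg (itemsR (if neg then br.1.tail else br.1))) :: compilePat br.2
    else .lit c :: compilePat p'
  termination_by p => p.length
  decreasing_by
  all_goals first
    | (have := classSplitB_len h; simp only [List.length_cons] at *; omega)
    | (simp only [List.length_cons]; omega)

/-- Source B `_tok_hits` (star never hits a single char this way). -/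
def tokHits : Tok → Char → Bool
  | .star, _ => false
  | .any, _ => true
  | .lit d, c => c = d
  | .cls n rs, c => rs.any (fun r => r.1 ≤ c ∧ c ≤ r.2) != n

/-- Source B: initial DP row, `row[j] = toks[j:] matches ""` (all-stars suffix). -/
def baseRow : List Tok → List Bool
  | [] => [true]
  | t :: ts =>
    let r := baseRow ts
    (r.headD false && t == Tok.star) :: r

/-- Source B: one DP step, new row for `c :: suffix` from the row for `suffix`,
    built right-to-left over the tokens. -/
def stepRow (c : Char) : List Tok → List Bool → List Bool
  | [], _ => [false]
  | t :: ts, prev =>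
    let nd := stepRow c ts prev.tail
    (match t with
     | .star => nd.headD false || prev.headD false
     | _ => prev.tail.headD false && tokHits t c) :: nd

/-- Source B `_match`: fold the DP rows over the string from the right; answer is row[0]
    (`if not any(row): return False` = an all-false row is kept unchanged). -/
def dpMatch (ts : List Tok) (s : List Char) : Bool :=
  (s.foldr (fun c row => if row.any id then stepRow c ts row else row) (baseRow ts)).headD false

def blocked_domain_py_alt (host : String) (patterns : List String) : Bool :=
  let safe := pvNorm host
  if safe = [] then false
  else patterns.any (fun p => dpMatch (compilePat (pvNorm p)) safe)

-- ===== PRECONDITION & SPEC =====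

-- Pre_ excludes patterns containing a character class with a reversed range such as [z-a]:
-- what such a class matches is nowhere specified (it even changed across Python versions),
-- and fnmatch's empty-range removal yields accidental results there — it can silently
-- negate the class — which no natural matcher reproduces.
def preClassOk : List Char → Bool
  | '[' :: r =>
    match splitClass r with
    | none => true
    | some br =>
      (itemsR (if br.1.headD ' ' = '!' then br.1.tail else br.1)).all (fun it => it.1 ≤ it.2)
  | _ => true

def preNoRev (p : List Char) : Bool := p.tails.all preClassOk

def Pre_blocked_domain_py (host : String) (patterns : List String) : Prop :=
  patterns.all (fun p => preNoRev (pvNorm p)) = true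
instance (host : String) (patterns : List String) : Decidable (Pre_blocked_domain_py host patterns) := by unfold Pre_blocked_domain_py; infer_instance

def pvWitness_blocked_domain_py : String × List String := ("sub.Example.com ", ["*.example.com", "bad-host?", "[a-z]*"])

def Spec_blocked_domain_py (host : String) (patterns : List String) (out : Bool) : Prop := out = blocked_domain_py_alt host patterns
instance (host : String) (patterns : List String) (out : Bool) : Decidable (Spec_blocked_domain_py host patterns out) := by unfold Spec_blocked_domain_py; infer_instance

-- ===== CLAIM (what is proved, stated in full; the proofs are below) =====
def Claim_equal_blocked_domain_py : Prop := ∀ (host : String) (patterns : List String), Dom_blocked_domain_py host patterns → Pre_blocked_domain_py host patterns → Spec_blocked_domain_py host patterns (blocked_domain_py host patterns)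

-- ===== LEMMAS AND PROOFS =====

theorem pvWitness_ok :
    Dom_blocked_domain_py pvWitness_blocked_domain_py.1 pvWitness_blocked_domain_py.2 ∧
    Pre_blocked_domain_py pvWitness_blocked_domain_py.1 pvWitness_blocked_domain_py.2 := by
  constructor <;> decide

-- ---------- B-side dynamic program = reference token matcher ----------

/-- Reference recursive matcher on token lists (proof device). -/
def tokMatch : List Tok → List Char → Bool
  | [], s => s.isEmpty
  | .star :: ts, s =>
    tokMatch ts s || (match s with | [] => false | _ :: s' => tokMatch (.star :: ts) s')
  | _ :: _, [] => false
  | t :: ts, c :: s' => tokHits t c && tokMatch ts s'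
  termination_by ts s => ts.length + s.length
  decreasing_by
  all_goals simp only [List.length_cons]; omega

lemma baseRow_head : ∀ ts, (baseRow ts).headD false = tokMatch ts [] := by
  intro ts
  induction ts with
  | nil => simp [baseRow, tokMatch]
  | cons t ts ih =>
    cases t with
    | star => simp only [baseRow, tokMatch]; simp only [Bool.or_false]; simpa using ih
    | any => simp [baseRow, tokMatch]
    | lit d => simp [baseRow, tokMatch]
    | cls n rs => simp [baseRow, tokMatch]

lemma stepRow_tail (c : Char) (t : Tok) (ts : List Tok) (prev : List Bool) :
    (stepRow c (t :: ts) prev).tail = stepRow c ts prev.tail := by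
  simp [stepRow]

lemma row_tail : ∀ (s : List Char) (t : Tok) (ts : List Tok),
    (s.foldr (fun c row => stepRow c (t :: ts) row) (baseRow (t :: ts))).tail
      = s.foldr (fun c row => stepRow c ts row) (baseRow ts) := by
  intro s t ts
  induction s with
  | nil => simp [baseRow]
  | cons c s ih => simp only [List.foldr_cons, stepRow_tail, ih]

lemma stepRow_head_star (c : Char) (ts : List Tok) (prev : List Bool) :
    (stepRow c (Tok.star :: ts) prev).headD false
      = ((stepRow c ts prev.tail).headD false || prev.headD false) := by
  simp [stepRow]

lemma stepRow_head_other (c : Char) (t : Tok) (ts : List Tok) (prev : List Bool)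
    (h : t ≠ Tok.star) :
    (stepRow c (t :: ts) prev).headD false = (prev.tail.headD false && tokHits t c) := by
  cases t
  · exact absurd rfl h
  all_goals simp [stepRow]

/-- The fold without the early exit (proof device). -/
def dpPlain (ts : List Tok) (s : List Char) : Bool :=
  (s.foldr (fun c row => stepRow c ts row) (baseRow ts)).headD false

lemma dpPlain_eq_tokMatch : ∀ (s : List Char) (ts : List Tok), dpPlain ts s = tokMatch ts s := by
  intro s
  induction s with
  | nil => intro ts; simpa [dpPlain] using baseRow_head ts
  | cons c s ih =>
    intro ts
    induction ts with
    | nil => simp [dpPlain, stepRow, tokMatch]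
    | cons t ts iht =>
      have hfold := row_tail s t ts
      have hprev : (List.foldr (fun c row => stepRow c (t :: ts) row) (baseRow (t :: ts)) s).headD false = tokMatch (t :: ts) s := by
        simpa [dpPlain] using ih (t :: ts)
      have hnext : (stepRow c ts (List.foldr (fun c row => stepRow c ts row) (baseRow ts) s)).headD false = tokMatch ts (c :: s) := by
        simpa [dpPlain] using iht
      have hstep : dpPlain (t :: ts) (c :: s) = (stepRow c (t :: ts) (List.foldr (fun c row => stepRow c (t :: ts) row) (baseRow (t :: ts)) s)).headD false := by
        simp [dpPlain]
      cases t with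
      | star =>
        rw [hstep, stepRow_head_star, hfold, hnext, hprev]
        simp [tokMatch]
      | any =>
        rw [hstep, stepRow_head_other _ _ _ _ (by simp), hfold]
        have hs2 := ih ts
        simp only [dpPlain] at hs2
        rw [hs2]
        simp [tokMatch, tokHits, Bool.and_comm]
      | lit d =>
        rw [hstep, stepRow_head_other _ _ _ _ (by simp), hfold]
        have hs2 := ih ts
        simp only [dpPlain] at hs2
        rw [hs2]
        simp [tokMatch, tokHits, Bool.and_comm]
      | cls n rs =>
        rw [hstep, stepRow_head_other _ _ _ _ (by simp), hfold]
        have hs2 := ih ts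
        simp only [dpPlain] at hs2
        rw [hs2]
        simp [tokMatch, tokHits, Bool.and_comm]

lemma headD_false_of_all_false {l : List Bool} (h : ∀ b ∈ l, b = false) :
    l.headD false = false := by
  cases l with
  | nil => rfl
  | cons a t => simpa using h a (by simp)

lemma baseRow_len (ts : List Tok) : (baseRow ts).length = ts.length + 1 := by
  induction ts with
  | nil => rfl
  | cons t ts ih => simp [baseRow, ih]

lemma stepRow_len (c : Char) : ∀ (ts : List Tok) (prev : List Bool),
    (stepRow c ts prev).length = ts.length + 1 := by
  intro ts
  induction ts with
  | nil => intro prev; rfl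
  | cons t ts ih => intro prev; simp [stepRow, ih]

lemma stepRow_all_false (c : Char) : ∀ (ts : List Tok) (prev : List Bool),
    (∀ b ∈ prev, b = false) → prev.length = ts.length + 1 → stepRow c ts prev = prev := by
  intro ts
  induction ts with
  | nil =>
    intro prev hall hlen
    match prev, hlen with
    | [b], _ =>
      have hb := hall b (by simp)
      subst hb
      rfl
  | cons t ts ih =>
    intro prev hall hlen
    match prev, hlen with
    | b :: rest, hlen =>
      have hb := hall b (by simp)
      have hrest : ∀ x ∈ rest, x = false := fun x hx => hall x (by simp [hx])
      have hr : stepRow c ts rest = rest := by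
        apply ih rest hrest
        simpa using hlen
      have htail : (b :: rest).tail = rest := rfl
      cases t with
      | star =>
        simp only [stepRow, htail, hr]
        rw [headD_false_of_all_false hrest]
        simp [hb]
      | any =>
        simp only [stepRow, htail, hr]
        rw [headD_false_of_all_false hrest]
        simp [hb]
      | lit d =>
        simp only [stepRow, htail, hr]
        rw [headD_false_of_all_false hrest]
        simp [hb]
      | cls n rs =>
        simp only [stepRow, htail, hr]
        rw [headD_false_of_all_false hrest]
        simp [hb]

lemma fold_len (ts : List Tok) : ∀ s : List Char,
    (s.foldr (fun c row => stepRow c ts row) (baseRow ts)).length = ts.length + 1 := by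
  intro s
  induction s with
  | nil => exact baseRow_len ts
  | cons c s ih => simp [stepRow_len]

lemma dpMatch_eq_dpPlain : ∀ (ts : List Tok) (s : List Char), dpMatch ts s = dpPlain ts s := by
  intro ts s
  unfold dpMatch dpPlain
  congr 1
  induction s with
  | nil => rfl
  | cons c s ih =>
    simp only [List.foldr_cons, ih]
    by_cases h : (s.foldr (fun c row => stepRow c ts row) (baseRow ts)).any id = true
    · rw [if_pos h]
    · rw [if_neg h]
      rw [Bool.not_eq_true] at h
      rw [List.any_eq_false] at h
      exact (stepRow_all_false c ts _ (by simpa using h) (fold_len ts s)).symm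

lemma dpMatch_eq_tokMatch (s : List Char) (ts : List Tok) : dpMatch ts s = tokMatch ts s :=
  (dpMatch_eq_dpPlain ts s).trans (dpPlain_eq_tokMatch s ts)

inductive CItem where
  | lit : Char → CItem
  | rng : Char → Char → CItem
deriving DecidableEq, Repr
def itemsF : List Char → List CItem
  | x :: '-' :: z :: r => .rng x z :: itemsF r
  | x :: r => .lit x :: itemsF r
  | [] => []
def cpair : CItem → Char × Char
  | .lit a => (a, a)
  | .rng x z => (x, z)
lemma itemsF_lit (x y : Char) (r : List Char) (hy : y ≠ '-') :
    itemsF (x::y::r) = .lit x :: itemsF (y::r) := by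
  rw [itemsF.eq_def]
  split
  · exfalso; rename_i heq; simp at heq; simp_all
  · rename_i x1 r1 heq
    simp at heq
    obtain ⟨h1, h2⟩ := heq
    subst h1; subst h2
    rfl
  · simp_all
lemma itemsR_lit (x y : Char) (r : List Char) (hy : y ≠ '-') :
    itemsR (x::y::r) = (x,x) :: itemsR (y::r) := by
  rw [itemsR.eq_def]
  split
  · exfalso; rename_i heq; simp at heq; simp_all
  · rename_i x1 r1 heq
    simp at heq
    obtain ⟨h1, h2⟩ := heq
    subst h1; subst h2
    rfl
  · simp_all
lemma itemsR_eq_map : ∀ l, itemsR l = (itemsF l).map cpair := by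
  intro l
  fun_induction itemsF l with
  | case1 x z r ih => show (x,z) :: itemsR r = _; simp [cpair, ih]
  | case2 x r h1 ih =>
    rcases r with _ | ⟨y, r2⟩
    · rfl
    · by_cases hy : y = '-'
      · subst hy
        rcases r2 with _ | ⟨z, r3⟩
        · rfl
        · exact ((h1 z r3) rfl).elim
      · rw [itemsR_lit x y r2 hy]
        simpa [cpair] using ih
  | case3 => rfl
def consHead (a : Char) : List (List Char) → List (List Char)
  | [] => [[a]]
  | c :: t => (a :: c) :: t
def sdSpec : List Char → List (List Char)
  | x :: '-' :: z :: r => [x] :: consHead z (sdSpec r)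
  | [x, '-'] => [[x], []]
  | x :: r => consHead x (sdSpec r)
  | [] => [[]]
def chunksOf : List CItem → List (List Char)
  | [] => [[]]
  | .lit a :: t => consHead a (chunksOf t)
  | .rng x z :: t => [x] :: consHead z (chunksOf t)
-- ---------- splitDash / sdSpec ----------

lemma splitDash_nil (s : Nat) (acc : List Char) : splitDash s acc [] = [acc.reverse] := rfl

lemma splitDash_cons (s : Nat) (acc : List Char) (c : Char) (r : List Char) :
    splitDash s acc (c :: r) =
      if s = 0 ∧ c = '-' then acc.reverse :: splitDash 2 [] r
      else splitDash (s - 1) (c :: acc) r := rfl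

lemma splitDash_ne_nil : ∀ (l : List Char) (s : Nat) (acc : List Char), splitDash s acc l ≠ [] := by
  intro l
  induction l with
  | nil => intro s acc; simp [splitDash_nil]
  | cons c r ih =>
    intro s acc
    rw [splitDash_cons]
    split
    · simp
    · exact ih _ _

lemma splitDash_acc : ∀ (l : List Char) (s : Nat) (acc : List Char),
    splitDash s acc l = (acc.reverse ++ (splitDash s [] l).headD []) :: (splitDash s [] l).tail := by
  intro l
  induction l with
  | nil => intro s acc; simp [splitDash_nil]
  | cons c r ih =>
    intro s acc
    rw [splitDash_cons, splitDash_cons]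
    split
    · rcases hs : splitDash 2 [] r with _ | ⟨c0, t0⟩
      · exact absurd hs (splitDash_ne_nil r 2 [])
      · simp
    · rw [ih (s-1) (c :: acc), ih (s-1) [c]]
      simp

lemma consHead_cons (a : Char) (c : List Char) (t : List (List Char)) :
    consHead a (c :: t) = (a :: c) :: t := rfl

lemma sdSpec_ne_nil : ∀ l, sdSpec l ≠ [] := by
  intro l
  rw [sdSpec.eq_def]
  split
  · simp [consHead]
  · simp
  · rename_i x r _ _
    cases h : sdSpec r <;> simp [consHead]
  · simp

lemma splitDash_spec : ∀ l, splitDash 1 [] l = sdSpec l := by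
  intro l
  fun_induction sdSpec l with
  | case1 x z r ih =>
    show splitDash 1 [] (x :: '-' :: z :: r) = _
    rw [splitDash_cons]
    simp only [one_ne_zero, false_and, if_false]
    rw [splitDash_cons]
    simp only [Nat.sub_self, true_and, reduceIte, List.reverse_cons, List.reverse_nil,
      List.nil_append]
    rw [splitDash_cons]
    simp only [OfNat.ofNat_ne_zero, false_and, if_false]
    rw [splitDash_acc r 1 [z], ih]
    rcases hs : sdSpec r with _ | ⟨c0, t0⟩
    · exact absurd hs (sdSpec_ne_nil r)
    · simp [consHead_cons]
  | case2 x =>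
    show splitDash 1 [] [x, '-'] = [[x], []]
    rw [splitDash_cons]
    simp only [one_ne_zero, false_and, if_false]
    rw [splitDash_cons]
    simp [splitDash_nil]
  | case3 x r h1 h2 ih =>
    rcases r with _ | ⟨y, r2⟩
    · show splitDash 1 [] [x] = consHead x (sdSpec [])
      rw [splitDash_cons]
      simp [splitDash_nil, sdSpec, consHead]
    · by_cases hy : y = '-'
      · subst hy
        rcases r2 with _ | ⟨z, r3⟩
        · exact (h2 rfl).elim
        · exact ((h1 z r3) rfl).elim
      · show splitDash 1 [] (x :: y :: r2) = _
        rw [splitDash_cons]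
        simp only [one_ne_zero, false_and, if_false]
        rw [splitDash_cons]
        simp only [Nat.sub_self]
        rw [if_neg (by simp [hy])]
        have e1 : splitDash 1 [] (y :: r2) = splitDash 0 [y] r2 := by
          rw [splitDash_cons]
          simp only [one_ne_zero, false_and, if_false, Nat.sub_self]
        rw [splitDash_acc r2 0 [y, x], ← ih, e1, splitDash_acc r2 0 [y]]
        rcases hs : splitDash 0 [] r2 with _ | ⟨c0, t0⟩
        · exact absurd hs (splitDash_ne_nil r2 0 [])
        · simp [consHead_cons]
  | case4 => rfl

-- ---------- fixLast / chunksOf ----------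

lemma fixLast_consHead (a : Char) : ∀ (ch : List (List Char)), ch ≠ [] →
    fixLast (consHead a ch) = consHead a (fixLast ch) := by
  intro ch hne
  match ch with
  | [c] => rfl
  | [c, d] =>
    show fixLast [a :: c, d] = consHead a (fixLast [c, d])
    by_cases hd : d = []
    · subst hd; simp [fixLast, consHead]
    · simp [fixLast, hd, consHead]
  | c :: d :: e :: t =>
    show fixLast ((a :: c) :: d :: e :: t) = consHead a (fixLast (c :: d :: e :: t))
    rw [show fixLast ((a :: c) :: d :: e :: t) = (a :: c) :: fixLast (d :: e :: t) from rfl,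
        show fixLast (c :: d :: e :: t) = c :: fixLast (d :: e :: t) from rfl]
    rfl

lemma fixLast_pair_of_ne (x : List Char) (m : List Char) (t : List (List Char)) (hm : m ≠ []) :
    fixLast (x :: m :: t) = x :: fixLast (m :: t) := by
  match t with
  | [] => simp [fixLast, hm]
  | e :: t2 => rfl

lemma chunksOf_ne_nil : ∀ its, chunksOf its ≠ [] := by
  intro its
  rw [chunksOf.eq_def]
  split
  · simp
  · rename_i a t
    cases h : chunksOf t <;> simp [consHead]
  · simp

lemma chunks_eq : ∀ l, fixLast (sdSpec l) = chunksOf (itemsF l) := by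
  intro l
  fun_induction sdSpec l with
  | case1 x z r ih =>
    show fixLast ([x] :: consHead z (sdSpec r)) = chunksOf (itemsF (x :: '-' :: z :: r))
    rw [show itemsF (x :: '-' :: z :: r) = .rng x z :: itemsF r from rfl]
    rw [show chunksOf (CItem.rng x z :: itemsF r) = [x] :: consHead z (chunksOf (itemsF r)) from rfl]
    rcases hs : sdSpec r with _ | ⟨h0, tt⟩
    · exact absurd hs (sdSpec_ne_nil r)
    · rw [hs] at ih
      rw [consHead_cons, fixLast_pair_of_ne [x] (z :: h0) tt (by simp),
          ← consHead_cons z h0 tt, fixLast_consHead z (h0 :: tt) (by simp), ih]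
  | case2 x =>
    show fixLast [[x], []] = chunksOf (itemsF [x, '-'])
    rw [show itemsF [x, '-'] = [.lit x, .lit '-'] from rfl]
    simp [fixLast, chunksOf, consHead]
  | case3 x r h1 h2 ih =>
    show fixLast (consHead x (sdSpec r)) = chunksOf (itemsF (x :: r))
    have hit : itemsF (x :: r) = .lit x :: itemsF r := by
      rcases r with _ | ⟨y, r2⟩
      · rfl
      · by_cases hy : y = '-'
        · subst hy
          rcases r2 with _ | ⟨z, r3⟩
          · exact (h2 rfl).elim
          · exact ((h1 z r3) rfl).elim
        · exact itemsF_lit x y r2 hy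
    rw [hit, show chunksOf (CItem.lit x :: itemsF r) = consHead x (chunksOf (itemsF r)) from rfl,
        fixLast_consHead _ _ (sdSpec_ne_nil r), ih]
  | case4 => rfl

-- ---------- mergeChunks is the identity when no range is reversed ----------

def bndOK : List (List Char) → Bool
  | c :: d :: t => (c.getLastD ' ' ≤ d.headD ' ') && bndOK (d :: t)
  | _ => true

lemma bndOK_cons (c d : List Char) (t : List (List Char)) :
    bndOK (c :: d :: t) = ((c.getLastD ' ' ≤ d.headD ' ') && bndOK (d :: t)) := rfl

lemma mergeChunks_id : ∀ ch, bndOK ch = true → mergeChunks ch = ch := by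
  intro ch
  fun_induction mergeChunks ch with
  | case1 => intro _; rfl
  | case2 => intro _; rfl
  | case3 c d t hx ih =>
    intro hb
    rw [bndOK_cons] at hb
    have h2 := (Bool.and_eq_true_iff.mp hb).2
    rw [ih h2] at hx
    simp at hx
  | case4 c d t e t' hx hlt ih =>
    intro hb
    exfalso
    rw [bndOK_cons] at hb
    have h1 := (Bool.and_eq_true_iff.mp hb).1
    have h2 := (Bool.and_eq_true_iff.mp hb).2
    rw [ih h2] at hx
    injection hx with hxa hxb
    subst hxa; subst hxb
    exact absurd hlt (not_lt.mpr (by simpa using h1))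
  | case5 c d t e t' hx hlt ih =>
    intro hb
    rw [bndOK_cons] at hb
    have h2 := (Bool.and_eq_true_iff.mp hb).2
    rw [ih h2] at hx
    injection hx with hxa hxb
    subst hxa; subst hxb
    rfl

lemma getLastD_irrel : ∀ (l : List Char), l ≠ [] → ∀ d₁ d₂ : Char, l.getLastD d₁ = l.getLastD d₂ := by
  intro l hl d₁ d₂
  cases l with
  | nil => exact absurd rfl hl
  | cons a r => rw [List.getLastD_cons, List.getLastD_cons]

lemma bndOK_cons_ne (a : Char) (c : List Char) (tt : List (List Char)) (hc : c ≠ []) :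
    bndOK ((a :: c) :: tt) = bndOK (c :: tt) := by
  cases tt with
  | nil => rfl
  | cons d t2 =>
    rw [bndOK_cons, bndOK_cons, List.getLastD_cons, getLastD_irrel c hc a ' ']

lemma chunksOf_head_empty : ∀ its, (chunksOf its).headD [] = [] → chunksOf its = [[]] := by
  intro its h
  match its with
  | [] => rfl
  | .lit a :: t =>
    exfalso
    rw [show chunksOf (.lit a :: t) = consHead a (chunksOf t) from rfl] at h
    cases hs : chunksOf t <;> rw [hs] at h <;> simp [consHead] at h
  | .rng x z :: t =>
    exfalso
    rw [show chunksOf (.rng x z :: t) = [x] :: consHead z (chunksOf t) from rfl] at h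
    simp at h

lemma bndOK_chunksOf : ∀ its, (∀ it ∈ its, (cpair it).1 ≤ (cpair it).2) →
    bndOK (chunksOf its) = true := by
  intro its
  induction its with
  | nil => intro _; rfl
  | cons it t ih =>
    intro hord
    have iht := ih (fun x hx => hord x (by simp [hx]))
    cases it with
    | lit a =>
      rw [show chunksOf (.lit a :: t) = consHead a (chunksOf t) from rfl]
      rcases hs : chunksOf t with _ | ⟨h0, tt⟩
      · exact absurd hs (chunksOf_ne_nil t)
      · by_cases hh : h0 = []
        · subst hh
          have := chunksOf_head_empty t (by rw [hs]; rfl)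
          rw [hs] at this
          obtain ⟨rfl⟩ : tt = [] := by simpa using this
          rfl
        · rw [consHead_cons, bndOK_cons_ne a h0 tt hh, ← hs]
          exact iht
    | rng x z =>
      rw [show chunksOf (.rng x z :: t) = [x] :: consHead z (chunksOf t) from rfl]
      rcases hs : chunksOf t with _ | ⟨h0, tt⟩
      · exact absurd hs (chunksOf_ne_nil t)
      · rw [consHead_cons, bndOK_cons]
        have hx : x ≤ z := by simpa [cpair] using hord (.rng x z) (by simp)
        have hrest : bndOK ((z :: h0) :: tt) = true := by
          by_cases hh : h0 = []
          · subst hh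
            have := chunksOf_head_empty t (by rw [hs]; rfl)
            rw [hs] at this
            obtain ⟨rfl⟩ : tt = [] := by simpa using this
            rfl
          · rw [bndOK_cons_ne z h0 tt hh, ← hs]
            exact iht
        simp [hrest, hx, List.getLastD]

-- ---------- reading literals/ranges off the chunks = the plain item semantics ----------

def memE (p : List Char × List (Char × Char)) (c : Char) : Bool :=
  p.1.contains c || p.2.any (fun r => r.1 ≤ c ∧ c ≤ r.2)

lemma extract_true_eq : ∀ (z : Char) (h : List Char) (tt : List (List Char)),
    extractTok true ((z :: h) :: tt) = extractTok false (h :: tt) := by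
  intro z h tt
  cases tt with
  | nil => rfl
  | cons d t2 =>
    show extractTok true ((z :: h) :: d :: t2) = extractTok false (h :: d :: t2)
    rw [extractTok.eq_def, extractTok.eq_def]
    simp

lemma char_le_antisymm (a c : Char) : (decide (a ≤ c ∧ c ≤ a)) = (decide (c = a)) := by
  by_cases h : c = a
  · subst h; simp
  · have hn : ¬(a ≤ c ∧ c ≤ a) := fun hp => h (le_antisymm hp.2 hp.1)
    simp [h, hn]

lemma char_le_antisymm' (a c : Char) : (decide (a ≤ c) && decide (c ≤ a)) = (decide (c = a)) := by
  by_cases h : c = a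
  · subst h; simp
  · have h1 : ¬(a ≤ c) ∨ ¬(c ≤ a) := by
      by_contra hcon
      push_neg at hcon
      exact h (le_antisymm hcon.2 hcon.1)
    rcases h1 with h1 | h1 <;> simp [h, h1]

lemma extract_member_cons : ∀ (a : Char) (h : List Char) (tt : List (List Char)) (c : Char),
    h ≠ [] →
    memE (extractTok false ((a :: h) :: tt)) c
      = ((decide (c = a)) || memE (extractTok false (h :: tt)) c) := by
  intro a h tt c hh
  cases tt with
  | nil =>
    show memE (a :: h, []) c = _
    rw [show extractTok false [h] = (h, ([] : List (Char × Char))) by rw [extractTok.eq_def]; simp]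
    simp [memE, List.contains_cons]
  | cons d t2 =>
    rw [show extractTok false ((a :: h) :: d :: t2)
          = ((a :: h).dropLast ++ (extractTok true (d :: t2)).1,
             ((a :: h).getLastD ' ', d.headD ' ') :: (extractTok true (d :: t2)).2) by
        rw [extractTok.eq_def]; simp [hh]]
    rw [show extractTok false (h :: d :: t2)
          = (h.dropLast ++ (extractTok true (d :: t2)).1,
             (h.getLastD ' ', d.headD ' ') :: (extractTok true (d :: t2)).2) by
        rw [extractTok.eq_def]; simp [hh]]
    rw [List.dropLast_cons_of_ne_nil hh]
    rw [show (a :: h).getLastD ' ' = h.getLastD ' ' by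
        rw [List.getLastD_cons]; exact getLastD_irrel h hh a ' ']
    simp [memE, List.contains_cons, Bool.or_assoc, Bool.or_comm, Bool.or_left_comm]

lemma extract_member : ∀ (its : List CItem) (c : Char),
    memE (extractTok false (chunksOf its)) c
      = (its.map cpair).any (fun r => r.1 ≤ c ∧ c ≤ r.2) := by
  intro its
  induction its with
  | nil => intro c; rfl
  | cons it t ih =>
    intro c
    cases it with
    | lit a =>
      rw [show chunksOf (.lit a :: t) = consHead a (chunksOf t) from rfl]
      rcases hs : chunksOf t with _ | ⟨h0, tt⟩
      · exact absurd hs (chunksOf_ne_nil t)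
      · rw [consHead_cons]
        by_cases hh : h0 = []
        · subst hh
          have := chunksOf_head_empty t (by rw [hs]; rfl)
          rw [hs] at this
          obtain ⟨rfl⟩ : tt = [] := by simpa using this
          have ht : memE (extractTok false (chunksOf t)) c = false := by
            rw [hs]; rfl
          show memE ([a], []) c = _
          simp only [List.map_cons, List.any_cons]
          rw [← ih c, ht]
          simp [memE, cpair]
          exact (char_le_antisymm' a c).symm
        · rw [extract_member_cons a h0 tt c hh, ← hs, ih c]
          simp only [List.map_cons, List.any_cons, cpair]
          rw [← char_le_antisymm a c]
    | rng x z =>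
      rw [show chunksOf (.rng x z :: t) = [x] :: consHead z (chunksOf t) from rfl]
      rcases hs : chunksOf t with _ | ⟨h0, tt⟩
      · exact absurd hs (chunksOf_ne_nil t)
      · rw [consHead_cons]
        rw [show extractTok false ([x] :: (z :: h0) :: tt)
              = ([x].dropLast ++ (extractTok true ((z :: h0) :: tt)).1,
                 ([x].getLastD ' ', (z :: h0).headD ' ') :: (extractTok true ((z :: h0) :: tt)).2) by
            rw [extractTok.eq_def]; simp]
        rw [extract_true_eq z h0 tt, ← hs]
        rw [show ([x] : List Char).dropLast = [] from rfl,
            show ([x] : List Char).getLastD ' ' = x from rfl,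
            show (z :: h0).headD ' ' = z from rfl]
        simp only [List.nil_append, List.map_cons, List.any_cons]
        have ihc := ih c
        simp only [memE] at ihc ⊢
        rw [← ihc]
        simp [cpair, Bool.or_assoc, Bool.or_comm, Bool.or_left_comm]


-- ---------- the characterization of fnmatch's class semantics ----------

lemma consHead_first (a : Char) (ch : List (List Char)) :
    ((consHead a ch).headD []).headD ' ' = a := by
  cases ch <;> simp [consHead]

lemma itemsF_shape : ∀ (x : Char) (r : List Char),
    (∃ z r3, r = '-' :: z :: r3 ∧ itemsF (x :: r) = .rng x z :: itemsF r3) ∨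
    (itemsF (x :: r) = .lit x :: itemsF r) := by
  intro x r
  rcases r with _ | ⟨y, r2⟩
  · right; rfl
  · by_cases hy : y = '-'
    · subst hy
      rcases r2 with _ | ⟨z, r3⟩
      · right; rfl
      · left; exact ⟨z, r3, rfl, rfl⟩
    · right; exact itemsF_lit x y r2 hy

lemma chunksOf_first_char : ∀ l, ((chunksOf (itemsF l)).headD []).headD ' ' = l.headD ' ' := by
  intro l
  rcases l with _ | ⟨x, r⟩
  · rfl
  · rcases itemsF_shape x r with ⟨z, r3, hr, hit⟩ | hit
    · rw [hit, show chunksOf (.rng x z :: itemsF r3) = [x] :: consHead z (chunksOf (itemsF r3)) from rfl]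
      rfl
    · rw [hit, show chunksOf (.lit x :: itemsF r) = consHead x (chunksOf (itemsF r)) from rfl,
          consHead_first]
      rfl

lemma ordered_of_all (l : List Char)
    (hok : (itemsR l).all (fun it => it.1 ≤ it.2) = true) :
    ∀ it ∈ itemsF l, (cpair it).1 ≤ (cpair it).2 := by
  intro it hit
  rw [itemsR_eq_map] at hok
  have := List.all_eq_true.mp hok (cpair it) (List.mem_map_of_mem hit)
  simpa using this

lemma bndOK_chunksOf_itemsF (l : List Char)
    (hok : (itemsR l).all (fun it => it.1 ≤ it.2) = true) :
    bndOK (chunksOf (itemsF l)) = true :=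
  bndOK_chunksOf (itemsF l) (ordered_of_all l hok)

lemma memE_chunks (l : List Char) (c : Char) :
    memE (extractTok false (chunksOf (itemsF l))) c
      = (itemsR l).any (fun r => r.1 ≤ c ∧ c ≤ r.2) := by
  rw [extract_member, itemsR_eq_map]

lemma inClass_natural (body : List Char) (c : Char)
    (hok : (itemsR (if body.headD ' ' = '!' then body.tail else body)).all
             (fun it => it.1 ≤ it.2) = true) :
    inClass body c
      = (((itemsR (if body.headD ' ' = '!' then body.tail else body)).any
            (fun r => r.1 ≤ c ∧ c ≤ r.2)) != (body.headD ' ' = '!' : Bool)) := by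
  by_cases hb : body.headD ' ' = '!'
  · rcases body with _ | ⟨b0, rest⟩
    · simp at hb
    · have hb0 : b0 = '!' := by simpa using hb
      subst hb0
      rw [if_pos hb] at hok
      simp only [List.tail_cons] at hok
      have hsd : splitDash 2 [] ('!' :: rest) = consHead '!' (sdSpec rest) := by
        rw [splitDash_cons]
        rw [if_neg (by simp)]
        rw [splitDash_acc rest 1 ['!'], splitDash_spec]
        rcases hs : sdSpec rest with _ | ⟨h0, tt⟩
        · exact absurd hs (sdSpec_ne_nil rest)
        · simp [consHead]
      have hfix : fixLast (consHead '!' (sdSpec rest)) = consHead '!' (chunksOf (itemsF rest)) := by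
        rw [fixLast_consHead '!' (sdSpec rest) (sdSpec_ne_nil rest), chunks_eq]
      have hbnd : bndOK (consHead '!' (chunksOf (itemsF rest))) = true := by
        rcases hs : chunksOf (itemsF rest) with _ | ⟨h2, tt2⟩
        · exact absurd hs (chunksOf_ne_nil _)
        · by_cases hh : h2 = []
          · subst hh
            have := chunksOf_head_empty _ (by rw [hs]; rfl)
            rw [hs] at this
            obtain ⟨rfl⟩ : tt2 = [] := by simpa using this
            rfl
          · rw [consHead_cons, bndOK_cons_ne '!' h2 tt2 hh, ← hs]
            exact bndOK_chunksOf_itemsF rest hok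
      have hmrg : mergeChunks (consHead '!' (chunksOf (itemsF rest)))
            = consHead '!' (chunksOf (itemsF rest)) := mergeChunks_id _ hbnd
      unfold inClass classTokens
      simp only [List.headD_cons, reduceIte]
      rw [hsd, hfix, hmrg]
      rcases hs : chunksOf (itemsF rest) with _ | ⟨h2, tt2⟩
      · exact absurd hs (chunksOf_ne_nil _)
      · rw [consHead_cons]
        have hm := memE_chunks rest c
        rw [hs] at hm
        simp only [memE] at hm
        simp only [List.headD_cons, reduceIte, ite_true, decide_true, List.tail_cons]
        rw [hm]
  · rw [if_neg hb] at hok ⊢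
    have hsd : splitDash (if body.headD ' ' = '!' then 2 else 1) [] body = sdSpec body := by
      rw [if_neg hb, splitDash_spec]
    have hmrg : mergeChunks (chunksOf (itemsF body)) = chunksOf (itemsF body) :=
      mergeChunks_id _ (bndOK_chunksOf_itemsF body hok)
    unfold inClass classTokens
    rw [hsd, chunks_eq, hmrg]
    have hm := memE_chunks body c
    simp only [memE] at hm
    simp only [chunksOf_first_char, hb, if_false, decide_false]
    rw [hm]

-- ---------- glue: compiled tokens, preNoRev propagation, the two matchers ----------

lemma compilePat_class (p' : List Char) :
    compilePat ('[' :: p') = (match splitClass p' with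
      | none => Tok.lit '[' :: compilePat p'
      | some br =>
        Tok.cls (br.1.headD ' ' = '!')
          (itemsR (if br.1.headD ' ' = '!' then br.1.tail else br.1)) :: compilePat br.2) := by
  simp only [compilePat]
  rw [if_neg (by decide), if_neg (by decide)]
  simp only [ite_true, if_true]
  have hb := classSplitB_eq_splitClass p'
  split <;> rename_i heq <;> rw [heq] at hb <;> rw [← hb]

lemma scanBody_suffix : ∀ {l b rest : List Char}, scanBody l = some (b, rest) → rest <:+ l := by
  intro l
  induction l with
  | nil => intro b rest h; simp [scanBody] at h
  | cons c r ih =>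
    intro b rest h
    simp only [scanBody] at h
    split at h
    · simp at h
      obtain ⟨-, hx2⟩ := h
      subst hx2
      exact (List.suffix_cons c r)
    · cases hs : scanBody r with
      | none => rw [hs] at h; simp at h
      | some br =>
        rw [hs] at h; simp at h
        obtain ⟨-, hx2⟩ := h
        subst hx2
        exact (ih (b := br.1) (by simpa using hs)).trans (List.suffix_cons c r)

lemma splitClass_suffix : ∀ {p : List Char} {br : List Char × List Char},
    splitClass p = some br → br.2 <:+ p := by
  intro p br h
  obtain ⟨b1, b2⟩ := br
  rcases p with _ | ⟨c, r⟩
  · simp [splitClass] at h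
  · simp only [splitClass] at h
    split_ifs at h with h1 h2
    · rcases r with _ | ⟨d, r2⟩
      · simp at h
      · simp only at h
        split_ifs at h with h3
        · cases hs : scanBody r2 with
          | none => rw [hs] at h; simp at h
          | some br2 =>
            rw [hs] at h; simp at h
            obtain ⟨-, hx2⟩ := h
            subst hx2
            exact ((scanBody_suffix (b := br2.1) (by simpa using hs)).trans
              (List.suffix_cons d r2)).trans (List.suffix_cons c (d :: r2))
        · cases hs : scanBody (d :: r2) with
          | none => rw [hs] at h; simp at h
          | some br2 =>
            rw [hs] at h; simp at h
            obtain ⟨-, hx2⟩ := h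
            subst hx2
            exact (scanBody_suffix (b := br2.1) (by simpa using hs)).trans
              (List.suffix_cons c (d :: r2))
    · cases hs : scanBody r with
      | none => rw [hs] at h; simp at h
      | some br2 =>
        rw [hs] at h; simp at h
        obtain ⟨-, hx2⟩ := h
        subst hx2
        exact (scanBody_suffix (b := br2.1) (by simpa using hs)).trans (List.suffix_cons c r)
    · cases hs : scanBody (c :: r) with
      | none => rw [hs] at h; simp at h
      | some br2 =>
        rw [hs] at h; simp at h
        subst h
        exact scanBody_suffix hs

lemma preNoRev_suffix {t p : List Char} (hs : t <:+ p) (hp : preNoRev p = true) :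
    preNoRev t = true := by
  unfold preNoRev at hp ⊢
  rw [List.all_eq_true] at hp ⊢
  intro t' ht'
  exact hp t' ((List.mem_tails _ _).mpr (((List.mem_tails _ _).mp ht').trans hs))

lemma preNoRev_tail {c : Char} {r : List Char} (hp : preNoRev (c :: r) = true) :
    preNoRev r = true :=
  preNoRev_suffix (List.suffix_cons c r) hp

lemma preNoRev_class {p' : List Char} {br : List Char × List Char}
    (hp : preNoRev ('[' :: p') = true) (hsc : splitClass p' = some br) :
    (itemsR (if br.1.headD ' ' = '!' then br.1.tail else br.1)).all
      (fun it => it.1 ≤ it.2) = true := by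
  unfold preNoRev at hp
  rw [List.all_eq_true] at hp
  have h0 : preClassOk ('[' :: p') = (match splitClass p' with
      | none => true
      | some br => (itemsR (if br.1.headD ' ' = '!' then br.1.tail else br.1)).all
          (fun it => it.1 ≤ it.2)) := rfl
  have := hp ('[' :: p') ((List.mem_tails _ _).mpr (List.suffix_refl _))
  rw [h0, hsc] at this
  exact this

lemma tokMatch_compile : ∀ p s, preNoRev p = true → tokMatch (compilePat p) s = rawMatch p s := by
  intro p s hp
  fun_induction rawMatch p s with
  | case1 s => cases s <;> simp [compilePat, tokMatch]
  | case2 p' s ih2 ih1 =>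
    have hp' : preNoRev p' = true := preNoRev_tail hp
    have hc : compilePat ('*' :: p') = Tok.star :: compilePat p' := by simp [compilePat]
    rw [hc]
    cases s with
    | nil => simp [tokMatch, ih2 hp']
    | cons a s' =>
      have h1 := ih1 hp
      rw [hc] at h1
      conv_lhs => rw [tokMatch]
      simp only []
      rw [ih2 hp', h1]
  | case3 p' h => simp [compilePat, tokMatch]
  | case4 p' a s' h ih =>
    simp [compilePat, tokMatch, tokHits, ih (preNoRev_tail hp)]
  | case5 p' hsc h1 h2 =>
    rw [compilePat_class, hsc]
    simp [tokMatch]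
  | case6 p' hsc a s' h1 h2 ih =>
    rw [compilePat_class, hsc]
    simp [tokMatch, tokHits, ih (preNoRev_tail hp)]
  | case7 p' br hsc h1 h2 =>
    rw [compilePat_class, hsc]
    simp [tokMatch]
  | case8 p' br hsc a s' h1 h2 ih =>
    rw [compilePat_class, hsc]
    have hok := preNoRev_class hp hsc
    have hcls := inClass_natural br.1 a hok
    have hbr : preNoRev br.2 = true :=
      preNoRev_suffix ((splitClass_suffix hsc).trans (List.suffix_cons '[' p')) hp
    simp [tokMatch, tokHits, hcls, ih hbr]
  | case9 c p' hn1 hn2 hn3 => simp [compilePat, hn1, hn2, hn3, tokMatch]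
  | case10 c p' hn1 hn2 hn3 a s' ih =>
    simp [compilePat, hn1, hn2, hn3, tokMatch, tokHits, ih (preNoRev_tail hp), eq_comm]

lemma aLoop_eq_any : ∀ (safe : List Char), safe ≠ [] → ∀ ps : List String,
    (∀ p ∈ ps, preNoRev (pvNorm p) = true) →
    aLoop safe ps = ps.any (fun p => dpMatch (compilePat (pvNorm p)) safe) := by
  intro safe hne ps
  induction ps with
  | nil => intro _; simp [aLoop]
  | cons p ps ih =>
    intro hpre
    have hp : preNoRev (pvNorm p) = true := hpre p (by simp)
    have hps : ∀ q ∈ ps, preNoRev (pvNorm q) = true := fun q hq => hpre q (by simp [hq])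
    simp only [aLoop, List.any_cons]
    by_cases hq : pvNorm p = []
    · have hz : dpMatch (compilePat (pvNorm p)) safe = false := by
        rw [hq, dpMatch_eq_tokMatch]
        cases safe with
        | nil => exact absurd rfl hne
        | cons a s => simp [compilePat, tokMatch]
      rw [if_pos hq, ih hps]
      simp [hz]
    · rw [dpMatch_eq_tokMatch, tokMatch_compile _ _ hp]
      by_cases hm : rawMatch (pvNorm p) safe = true
      · simp [hq, hm]
      · simp [hq, hm, ih hps]

-- ===== VERDICT (by name: the statement is the Claim_ definition above) =====
theorem blocked_domain_py_spec : Claim_equal_blocked_domain_py := by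
  intro host patterns _ hpre
  unfold Spec_blocked_domain_py blocked_domain_py blocked_domain_py_alt
  unfold Pre_blocked_domain_py at hpre
  rw [List.all_eq_true] at hpre
  by_cases h : pvNorm host = []
  · simp [h]
  · simp only [h, if_neg h]
    exact aLoop_eq_any _ h patterns (fun p hp => by simpa using hpre p hp)
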